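-- pv_equiv track=rewrite | github.com/MF-Guilherme/Beecrowd | Iniciante/bee1101_sequencia_de_numeros_e_soma.py | sequencia
-- ===== SOURCE A (Python) =====
-- def sequencia(x, y):
--     lista = []
--     if x >= y:
--         for i in range(y, x + 1):
--             lista.append(i)
--     else:
--         for i in range(x, y + 1):
--             lista.append(i)
--     return lista, sum(lista)
-- ===== SOURCE B (Python) =====
-- def sequencia(x, y):
--     if x >= y:
--         lo, hi = y, x
--     else:
--         lo, hi = x, y
--     lista = list(range(lo, hi + 1))
--     total = (lo + hi) * (hi - lo + 1) // 2
--     return lista, total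
-- ===== Notes on version B (the rewrite author's own statement) =====
-- stated objective: simpler
-- what changed: B orders the endpoints once, builds the list with a single range() constructor instead of two append loops, and replaces the O(n) sum() by the closed-form Gauss formula (lo+hi)*(hi-lo+1)//2.
import Mathlib
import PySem

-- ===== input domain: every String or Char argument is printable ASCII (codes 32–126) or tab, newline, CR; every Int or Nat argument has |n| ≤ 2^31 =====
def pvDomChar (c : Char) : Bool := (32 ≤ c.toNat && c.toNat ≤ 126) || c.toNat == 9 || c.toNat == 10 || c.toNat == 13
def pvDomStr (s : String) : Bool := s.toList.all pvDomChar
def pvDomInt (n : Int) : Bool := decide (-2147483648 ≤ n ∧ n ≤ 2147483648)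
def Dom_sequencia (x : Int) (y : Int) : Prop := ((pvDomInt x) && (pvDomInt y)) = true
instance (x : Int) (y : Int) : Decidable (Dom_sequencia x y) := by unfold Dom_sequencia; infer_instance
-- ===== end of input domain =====

-- ===== PORT A =====
-- literal transliteration of A: two append loops over pyRange, then sum
def sequencia (x : Int) (y : Int) : List Int × Int :=
  let lista : List Int :=
    if x ≥ y then
      (PySem.List.pyRange y (x + 1) 1).foldl (fun acc i => acc ++ [i]) []
    else
      (PySem.List.pyRange x (y + 1) 1).foldl (fun acc i => acc ++ [i]) []
  (lista, lista.sum)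

-- ===== PORT B =====
-- B: order endpoints once, range constructor for the list, Gauss closed form for the sum
def sequencia_alt (x : Int) (y : Int) : List Int × Int :=
  let lo : Int := if x ≥ y then y else x
  let hi : Int := if x ≥ y then x else y
  (PySem.List.pyRange lo (hi + 1) 1, PySem.Int.floordiv ((lo + hi) * (hi - lo + 1)) 2)

-- ===== PRECONDITION & SPEC =====
def Spec_sequencia (x : Int) (y : Int) (out : List Int × Int) : Prop := out = sequencia_alt x y
instance (x : Int) (y : Int) (out : List Int × Int) : Decidable (Spec_sequencia x y out) := by unfold Spec_sequencia; infer_instance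

-- ===== CLAIM (what is proved, stated in full; the proofs are below) =====
def Claim_equal_sequencia : Prop := ∀ (x : Int) (y : Int), Dom_sequencia x y → Spec_sequencia x y (sequencia x y)

-- ===== LEMMAS AND PROOFS =====

-- ===== VERDICT (by name: the statement is the Claim_ definition above) =====
-- double the sum of a consecutive range: 2·Σ = (2a + n - 1)·n
theorem pv_sum_pyRange (n : Nat) : ∀ a : Int,
    (PySem.List.pyRange a (a + n) 1).sum * 2 = (2 * a + n - 1) * n := by
  induction n with
  | zero => intro a; simp [pysem]
  | succ m ih =>
    intro a
    rw [PySem.List.pyRange_one_cons (by omega)]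
    have h := ih (a + 1)
    simp only [List.sum_cons]
    push_cast
    push_cast at h
    have : a + 1 + (m : Int) = a + (m + 1 : Int) := by ring
    rw [this] at h
    nlinarith [h]

theorem pv_sum_gauss (lo hi : Int) (h : lo ≤ hi) :
    (PySem.List.pyRange lo (hi + 1) 1).sum
      = PySem.Int.floordiv ((lo + hi) * (hi - lo + 1)) 2 := by
  have hn : hi + 1 = lo + ((hi + 1 - lo).toNat : Int) := by omega
  have hs := pv_sum_pyRange (hi + 1 - lo).toNat lo
  rw [← hn] at hs
  have hcast : ((hi + 1 - lo).toNat : Int) = hi + 1 - lo := by omega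
  rw [hcast] at hs
  have hval : (lo + hi) * (hi - lo + 1) = (PySem.List.pyRange lo (hi + 1) 1).sum * 2 := by
    rw [hs]; ring
  rw [hval, PySem.Int.floordiv_eq_ediv_of_pos (by norm_num)]
  omega

theorem pv_foldl_append (l : List Int) :
    l.foldl (fun acc i => acc ++ [i]) [] = l := by
  rw [PySem.List.foldl_append_singleton]; simp

theorem sequencia_spec : Claim_equal_sequencia := by
  intro x y _
  unfold Spec_sequencia sequencia sequencia_alt
  by_cases hxy : x ≥ y <;>
    simp only [hxy, if_pos, pv_foldl_append] <;>
    [exact Prod.ext rfl (pv_sum_gauss y x (by omega));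
     exact Prod.ext rfl (pv_sum_gauss x y (by omega))]
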